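-- pv_equiv track=rewrite | github.com/BU-DiSC/BF-Shared-Hashing | micro/exp.py | find_fst_percent
-- ===== SOURCE A (Python) =====
-- def find_fst_percent(line):
-- 	start = -1
-- 	end = 0
-- 	for i, c in enumerate(line.strip()):
-- 		if c.isdigit() and start == -1:
-- 			start = i
-- 		elif c == "%" and start != -1:
-- 			end = i
-- 			break
-- 	return start,end
-- ===== SOURCE B (Python) =====
-- def find_fst_percent(line):
--     s = line.strip()
--     start, end, pct = -1, 0, 0
--     for i, c in reversed(list(enumerate(s))):
--         if c == "%":
--             pct = i          # nearest percent sign to the right of everything still to come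
--         elif c.isdigit():
--             start, end = i, pct
--     return start, end
-- ===== Notes on version B (the rewrite author's own statement) =====
-- stated objective: alternative
-- what changed: B scans the stripped string right-to-left once, maintaining the index of the nearest percent sign seen so far; each digit overwrites (start, end) with its index and that percent index, so the leftmost digit wins, replacing A's left-to-right stateful scan with break.
import Mathlib
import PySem

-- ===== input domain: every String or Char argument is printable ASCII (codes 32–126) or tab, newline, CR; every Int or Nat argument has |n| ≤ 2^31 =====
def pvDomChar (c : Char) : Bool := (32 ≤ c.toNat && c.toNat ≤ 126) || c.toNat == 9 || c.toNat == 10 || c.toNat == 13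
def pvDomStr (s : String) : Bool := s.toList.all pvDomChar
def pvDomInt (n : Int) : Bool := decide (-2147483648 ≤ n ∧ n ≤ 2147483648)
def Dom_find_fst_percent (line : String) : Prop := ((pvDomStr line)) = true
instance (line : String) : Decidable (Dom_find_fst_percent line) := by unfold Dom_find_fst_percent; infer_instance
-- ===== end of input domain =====

-- B replaces A's left-to-right scan-with-break by ONE right-to-left pass keeping the nearest percent-sign index; alternative traversal, same cost.

-- ===== PORT A =====
-- A's for-loop over enumerate(line.strip()) with state (start, end) and break,
-- transliterated as structural recursion carrying the index i and start.
def findFstLoop (cs : List Char) (i : Int) (start : Int) : Int × Int :=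
  match cs with
  | [] => (start, 0)
  | c :: rest =>
    if PySem.Chars.isdigit c && (start == -1) then findFstLoop rest (i + 1) i
    else if (c == '%') && (start != -1) then (start, i)
    else findFstLoop rest (i + 1) start

def find_fst_percent (line : String) : Int × Int :=
  findFstLoop (PySem.Str.strip line).toList 0 (-1)

-- ===== PORT B =====
-- one step of Source B's reversed loop on the state (start, end, pct)
def bStep (st : Int × Int × Int) (ic : Int × Char) : Int × Int × Int :=
  if ic.2 == '%' then (st.1, st.2.1, ic.1)
  else if PySem.Chars.isdigit ic.2 then (ic.1, st.2.2, st.2.2)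
  else st

-- Source B: fold bStep over reversed(list(enumerate(s))) starting from (-1, 0, 0)
def find_fst_percent_alt (line : String) : Int × Int :=
  let st := ((PySem.List.enumerate (PySem.Str.strip line).toList 0).reverse).foldl bStep (-1, 0, 0)
  (st.1, st.2.1)

-- ===== PRECONDITION & SPEC =====
def Spec_find_fst_percent (line : String) (out : Int × Int) : Prop := out = find_fst_percent_alt line
instance (line : String) (out : Int × Int) : Decidable (Spec_find_fst_percent line out) := by unfold Spec_find_fst_percent; infer_instance

-- ===== CLAIM =====
def Claim_equal_find_fst_percent : Prop := ∀ (line : String), Dom_find_fst_percent line → Spec_find_fst_percent line (find_fst_percent line)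

-- ===== LEMMAS AND PROOFS =====

-- proof-side reference scans: first digit index (with remaining suffix), first '%' index
def bScanDigit (cs : List Char) (i : Int) : Option (Int × List Char) :=
  match cs with
  | [] => none
  | c :: rest => if PySem.Chars.isdigit c then some (i, rest) else bScanDigit rest (i + 1)

def bScanPercent (cs : List Char) (i : Int) : Int :=
  match cs with
  | [] => -1
  | c :: rest => if c == '%' then i else bScanPercent rest (i + 1)

-- common specification both ports are proved equal to
def specPair (cs : List Char) (i : Int) : Int × Int :=
  match bScanDigit cs i with
  | none => (-1, 0)
  | some (s, rest) =>
    if bScanPercent rest (s + 1) == -1 then (s, 0) else (s, bScanPercent rest (s + 1))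

def pdef (cs : List Char) (i : Int) : Int :=
  if bScanPercent cs i == -1 then 0 else bScanPercent cs i

theorem digit_ne_percent {c : Char} (h : PySem.Chars.isdigit c = true) : (c == '%') = false := by
  by_contra hne
  have hc : c = '%' := by
    have := eq_of_beq (a := c) (b := '%') (by simpa using hne)
    exact this
  subst hc
  exact absurd h (by decide)

-- once start is set (start ≠ -1), A's loop is exactly the '%'-scan
theorem findFstLoop_set (cs : List Char) : ∀ (i s : Int), 0 ≤ i → s ≠ -1 →
    findFstLoop cs i s =
      if bScanPercent cs i == -1 then (s, 0) else (s, bScanPercent cs i) := by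
  induction cs with
  | nil => intro i s _ _; simp [findFstLoop, bScanPercent]
  | cons c rest ih =>
    intro i s hi hs
    have hsb : (s == -1) = false := by simp [hs]
    by_cases hc : (c == '%') = true
    · have hi' : (i == -1) = false := by
        rw [beq_eq_false_iff_ne]; omega
      simp [findFstLoop, bScanPercent, hsb, hc, bne, hi']
    · have hc' : (c == '%') = false := by simpa using hc
      simp only [findFstLoop, bScanPercent, hsb, hc', Bool.and_false, Bool.false_and,
        Bool.false_eq_true, if_false]
      exact ih (i + 1) s (by omega) hs

-- before the first digit, A's loop computes specPair
theorem findFstLoop_unset (cs : List Char) : ∀ (i : Int), 0 ≤ i →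
    findFstLoop cs i (-1) = specPair cs i := by
  induction cs with
  | nil => intro i _; simp [findFstLoop, specPair, bScanDigit]
  | cons c rest ih =>
    intro i hi
    by_cases hd : PySem.Chars.isdigit c = true
    · simp only [findFstLoop, specPair, bScanDigit, hd, Bool.true_and, if_pos, beq_self_eq_true]
      exact findFstLoop_set rest (i + 1) i (by omega) (by omega)
    · have hd' : PySem.Chars.isdigit c = false := by simpa using hd
      simp only [findFstLoop, specPair, bScanDigit, hd', Bool.false_and, Bool.false_eq_true,
        bne, beq_self_eq_true, Bool.not_true, Bool.and_false, if_false]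
      simpa [specPair] using ih (i + 1) (by omega)

-- B's reversed fold, rewritten as a right fold over the enumeration, computes (specPair, pdef)
theorem bFoldr_spec (cs : List Char) : ∀ (i : Int), 0 ≤ i →
    (PySem.List.enumerate cs i).foldr (fun ic st => bStep st ic) (-1, 0, 0) =
      ((specPair cs i).1, (specPair cs i).2, pdef cs i) := by
  induction cs with
  | nil => intro i _; simp [PySem.List.enumerate_nil, specPair, bScanDigit, pdef, bScanPercent]
  | cons c rest ih =>
    intro i hi
    rw [PySem.List.enumerate_cons, List.foldr_cons, ih (i + 1) (by omega)]
    by_cases hc : (c == '%') = true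
    · have hd : PySem.Chars.isdigit c = false := by
        by_contra h
        have := digit_ne_percent (c := c) (by simpa using h)
        simp [hc] at this
      have hi' : (i == -1) = false := by rw [beq_eq_false_iff_ne]; omega
      simp [bStep, hc, specPair, bScanDigit, hd, pdef, bScanPercent, hi']
    · have hc' : (c == '%') = false := by simpa using hc
      by_cases hd : PySem.Chars.isdigit c = true
      · simp only [bStep, hc', Bool.false_eq_true, if_false, hd, if_pos]
        simp only [specPair, bScanDigit, hd, if_pos, pdef, bScanPercent, hc',
          Bool.false_eq_true, if_false]
        by_cases hp : (bScanPercent rest (i + 1) == -1) = true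
        · simp [hp]
        · simp [Bool.of_not_eq_true hp]
      · have hd' : PySem.Chars.isdigit c = false := by simpa using hd
        simp [bStep, hc', hd', specPair, bScanDigit, pdef, bScanPercent]

-- ===== VERDICT =====
theorem find_fst_percent_spec : Claim_equal_find_fst_percent := by
  intro line _
  unfold Spec_find_fst_percent find_fst_percent find_fst_percent_alt
  rw [List.foldl_reverse, bFoldr_spec _ 0 le_rfl, findFstLoop_unset _ 0 le_rfl]
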